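-- pv_equiv track=rewrite | github.com/gogadrz/my_project | Module20/task03.py | tuple_slice
-- ===== SOURCE A (Python) =====
-- def tuple_slice(tpl, sym):
--     result_str = ''
--     to_str = False
--     if sym not in tpl:
--         return ()
--     else:
--         for item in tpl:
--             if item == sym:
--                 if to_str == False:
--                     to_str = True
--                 else:
--                     result_str += item
--                     to_str = False
--             if to_str:
--                 result_str += item
--
--     return tuple(result_str)
-- ===== SOURCE B (Python) =====
-- def tuple_slice(tpl, sym):
--     # pairwise-slice pass over the index list of sym occurrences
--     idx = [i for i, x in enumerate(tpl) if x == sym]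
--     s = ''
--     k = 0
--     while k + 1 < len(idx):
--         s += ''.join(tpl[idx[k]:idx[k + 1] + 1])
--         k += 2
--     if k < len(idx):
--         s += ''.join(tpl[idx[k]:])
--     return tuple(s)
-- ===== Notes on version B (the rewrite author's own statement) =====
-- stated objective: alternative
-- what changed: A's single pass with a toggling to_str flag is replaced by first collecting the indices of all sym occurrences and then concatenating inclusive slices tpl[i:j+1] for consecutive index pairs (slice to the end for a trailing unpaired index), dropping the 'sym not in tpl' guard.
import Mathlib
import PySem

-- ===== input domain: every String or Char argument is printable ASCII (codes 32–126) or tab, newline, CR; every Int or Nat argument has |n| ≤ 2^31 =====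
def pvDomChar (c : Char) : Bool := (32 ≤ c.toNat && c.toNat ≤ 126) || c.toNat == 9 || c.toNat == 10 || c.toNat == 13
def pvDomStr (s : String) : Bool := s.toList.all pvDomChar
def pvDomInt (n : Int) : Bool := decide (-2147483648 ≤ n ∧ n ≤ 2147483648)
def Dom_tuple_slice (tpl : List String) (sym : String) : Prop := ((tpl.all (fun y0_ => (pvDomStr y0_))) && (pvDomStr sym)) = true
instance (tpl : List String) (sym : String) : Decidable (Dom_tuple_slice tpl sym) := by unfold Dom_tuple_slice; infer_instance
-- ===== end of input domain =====

-- B replaces A's one-pass toggling flag by an index-list + pairwise-slice pass (different decomposition, same cost).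


-- ===== PORT A =====
-- tuple(result_str) splits the string into one-character strings
def tuple_slice (tpl : List String) (sym : String) : List String :=
  if sym ∉ tpl then []
  else
    let final := tpl.foldl (fun (acc : String × Bool) item =>
      let acc1 :=
        if item = sym then
          if acc.2 = false then (acc.1, true) else (acc.1 ++ item, false)
        else acc
      if acc1.2 then (acc1.1 ++ item, acc1.2) else acc1) ("", false)
    final.1.toList.map (fun c => String.ofList [c])

-- ===== PORT B =====
-- Source B's while loop over idx stepping k by 2; tpl[i:j+1] for in-range nonnegative
-- i ≤ j is exactly (tpl.drop i).take (j+1-i), and tpl[i:] is tpl.drop i.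
def pvPairs (tpl : List String) : List Nat → String
  | i :: j :: rest => String.join ((tpl.drop i).take (j + 1 - i)) ++ pvPairs tpl rest
  | [i] => String.join (tpl.drop i)
  | [] => ""

def tuple_slice_alt (tpl : List String) (sym : String) : List String :=
  let idx := (tpl.zipIdx.filter (fun p => p.1 == sym)).map (·.2)
  (pvPairs tpl idx).toList.map (fun c => String.ofList [c])

-- ===== PRECONDITION & SPEC =====
def Spec_tuple_slice (tpl : List String) (sym : String) (out : List String) : Prop := out = tuple_slice_alt tpl sym
instance (tpl : List String) (sym : String) (out : List String) : Decidable (Spec_tuple_slice tpl sym out) := by unfold Spec_tuple_slice; infer_instance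

-- ===== CLAIM (what is proved, stated in full; the proofs are below) =====
def Claim_equal_tuple_slice : Prop := ∀ (tpl : List String) (sym : String), Dom_tuple_slice tpl sym → Spec_tuple_slice tpl sym (tuple_slice tpl sym)

-- ===== LEMMAS AND PROOFS =====

-- A's loop body as structural recursion on the list, parametrised by the flag
def pvFA (sym : String) : List String → Bool → String
  | [], _ => ""
  | x :: xs, t =>
    if x = sym then
      if t then x ++ pvFA sym xs false else x ++ pvFA sym xs true
    else
      if t then x ++ pvFA sym xs true else pvFA sym xs false

-- index list of occurrences of sym
def pvIdxs (sym : String) : List String → List Nat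
  | [] => []
  | x :: xs => if x = sym then 0 :: (pvIdxs sym xs).map (· + 1) else (pvIdxs sym xs).map (· + 1)

lemma pvJoin_cons (x : String) (xs : List String) :
    String.join (x :: xs) = x ++ String.join xs := by
  simp [String.join]
  induction xs generalizing x with
  | nil => simp
  | cons y ys ih => simp [ih (x ++ y), ih y, String.append_assoc]

-- two-at-a-time induction on lists
lemma pvTwoStep {α : Type} {P : List α → Prop} (h0 : P []) (h1 : ∀ i, P [i])
    (h2 : ∀ i j rest, P rest → P (i :: j :: rest)) : ∀ l, P l := by
  have key : ∀ n (l : List α), l.length ≤ n → P l := by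
    intro n
    induction n with
    | zero => intro l hl; cases l with
      | nil => exact h0
      | cons a l => simp at hl
    | succ n ih =>
      intro l hl
      match l with
      | [] => exact h0
      | [i] => exact h1 i
      | i :: j :: rest =>
        apply h2
        apply ih
        simp at hl; omega
  intro l; exact key l.length l le_rfl

lemma pvPairs_shift (x : String) (xs : List String) :
    ∀ l : List Nat, pvPairs (x :: xs) (l.map (· + 1)) = pvPairs xs l := by
  apply pvTwoStep
  · simp [pvPairs]
  · intro i; simp [pvPairs]
  · intro i j rest ih
    have e : j + 1 + 1 - (i + 1) = j + 1 - i := by omega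
    simp only [List.map_cons, pvPairs, List.drop_succ_cons, e, ih]

lemma pvIdx_eq (sym : String) :
    ∀ (xs : List String) (k : Nat),
      ((List.zipIdx xs k).filter (fun p => p.1 == sym)).map (·.2)
        = (pvIdxs sym xs).map (· + k) := by
  intro xs
  induction xs with
  | nil => intro k; simp [pvIdxs]
  | cons x xs ih =>
    intro k
    simp only [List.zipIdx_cons, List.filter_cons, pvIdxs]
    by_cases h : x = sym
    · simp [h, ih (k + 1), List.map_map]
      intro a _; omega
    · simp [h, ih (k + 1), List.map_map]
      intro a _; omega

-- main invariant: B's pairwise pass equals A's flagged recursion (both states)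
lemma pvMain (sym : String) : ∀ xs : List String,
    pvPairs xs (pvIdxs sym xs) = pvFA sym xs false ∧
    pvFA sym xs true =
      (match pvIdxs sym xs with
       | [] => String.join xs
       | j :: rest => String.join (xs.take (j + 1)) ++ pvPairs xs rest) := by
  intro xs
  induction xs with
  | nil => simp [pvIdxs, pvPairs, pvFA, String.join]
  | cons x xs ih =>
    obtain ⟨ihP, ihQ⟩ := ih
    by_cases h : x = sym
    · subst h
      constructor
      · cases hidx : pvIdxs x xs with
        | nil =>
          simp [pvIdxs, hidx, pvPairs, pvFA, ihQ, pvJoin_cons]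
        | cons j rest =>
          simp [pvIdxs, hidx, pvPairs, pvFA, ihQ, pvPairs_shift, pvJoin_cons,
            List.take_succ_cons, String.append_assoc]
      · simp [pvIdxs, pvFA, ihP, pvPairs_shift, String.join,
          List.take_succ_cons]
    · constructor
      · simp [pvIdxs, h, pvPairs_shift, ihP, pvFA]
      · rw [pvFA]
        simp only [if_neg h]
        rw [ihQ]
        simp only [pvIdxs, if_neg h]
        cases hidx : pvIdxs sym xs with
        | nil => simp [pvJoin_cons]
        | cons j rest =>
          simp [pvJoin_cons, List.take_succ_cons, pvPairs_shift, String.append_assoc]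

-- A's foldl accumulates exactly pvFA
lemma pvFoldl (sym : String) : ∀ (xs : List String) (r : String) (t : Bool),
    (xs.foldl (fun (acc : String × Bool) item =>
      let acc1 :=
        if item = sym then
          if acc.2 = false then (acc.1, true) else (acc.1 ++ item, false)
        else acc
      if acc1.2 then (acc1.1 ++ item, acc1.2) else acc1) (r, t)).1
      = r ++ pvFA sym xs t := by
  intro xs
  induction xs with
  | nil => intro r t; simp [pvFA]
  | cons x xs ih =>
    intro r t
    rw [List.foldl_cons, pvFA]
    by_cases h : x = sym
    · cases t with
      | false => simp [h, ih, String.append_assoc]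
      | true => simp [h, ih, String.append_assoc]
    · cases t with
      | false => simp [h, ih]
      | true => simp [h, ih, String.append_assoc]

lemma pvFA_not_mem (sym : String) : ∀ xs : List String, sym ∉ xs → pvFA sym xs false = "" := by
  intro xs
  induction xs with
  | nil => intro _; rfl
  | cons x xs ih =>
    intro h
    rw [pvFA]
    have hx : x ≠ sym := fun e => h (by simp [e])
    simp [hx, ih (fun hm => h (List.mem_cons_of_mem _ hm))]

-- ===== VERDICT (by name: the statement is the Claim_ definition above) =====
theorem tuple_slice_spec : Claim_equal_tuple_slice := by
  unfold Claim_equal_tuple_slice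
  intro tpl sym _
  unfold Spec_tuple_slice tuple_slice tuple_slice_alt
  have hidx : (tpl.zipIdx.filter (fun p => p.1 == sym)).map (·.2) = pvIdxs sym tpl := by
    rw [pvIdx_eq sym tpl 0]
    simp
  rw [hidx]
  have hB : pvPairs tpl (pvIdxs sym tpl) = pvFA sym tpl false := (pvMain sym tpl).1
  by_cases h : sym ∈ tpl
  · simp only [h, not_true_eq_false, if_neg (by simp : ¬ False)]
    rw [pvFoldl sym tpl "" false]
    rw [hB]
    simp
  · simp only [h, not_false_eq_true, if_pos trivial]
    rw [hB, pvFA_not_mem sym tpl h]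
    simp
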